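-- pv_equiv track=rewrite | github.com/dennisblaufuss/FS_MADS | Semester 1/Algo/Other Stuff/fibunacci.py | fibonacci_max
-- ===== SOURCE A (Python) =====
-- m = {}
--
-- def fibonacci(n):
--     if n == 0:
--         return 0
--     elif n < 3:
--         return 1
--     elif n in m:
--         return m[n]
--     else:
--         f = fibonacci(n - 1) + fibonacci(n - 2)
--         m[n] = f
--         return f
--
-- def fibonacci_max(x):
--     n = 0
--     while True:
--         f = fibonacci(n)
--         if f > x:
--             break
--         n += 1
--     return fibonacci(n - 1)
-- ===== SOURCE B (Python) =====
-- def fibonacci_max(x):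
--     prev, curr = 1, 0
--     while curr <= x:
--         prev, curr = curr, prev + curr
--     return prev
-- ===== Notes on version B (the rewrite author's own statement) =====
-- stated objective: simpler
-- what changed: Replaces the memoized recursive fibonacci plus an index-scanning while loop (recomputing fibonacci(n) each iteration) with one self-contained loop advancing two running variables (prev, curr) by the recurrence.
import Mathlib
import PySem

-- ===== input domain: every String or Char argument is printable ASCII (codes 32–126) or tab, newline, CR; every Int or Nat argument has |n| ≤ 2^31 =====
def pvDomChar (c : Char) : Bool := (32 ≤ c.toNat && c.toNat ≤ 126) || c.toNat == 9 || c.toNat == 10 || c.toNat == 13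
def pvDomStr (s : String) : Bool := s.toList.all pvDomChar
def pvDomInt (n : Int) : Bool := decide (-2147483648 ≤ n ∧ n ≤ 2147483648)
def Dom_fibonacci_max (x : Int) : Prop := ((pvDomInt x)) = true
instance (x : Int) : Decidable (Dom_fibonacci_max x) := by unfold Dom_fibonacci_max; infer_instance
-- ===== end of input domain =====

-- B replaces the memoized recursive fibonacci + index-scanning loop by a single
-- two-variable iterative loop (simpler; return values identical).


-- ===== PORT A =====
-- fibonacci(n) with the global memo dict m threaded explicitly as state
-- (Python mutates a module-level dict; the port passes it in and returns it).
def fibonacciA (m : PySem.Dict Int Int) (n : Int) : Int × PySem.Dict Int Int :=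
  if n = 0 then (0, m)
  else if n < 3 then (1, m)
  else match PySem.Dict.get? m n with
  | some v => (v, m)
  | none =>
    let p1 := fibonacciA m (n - 1)
    let p2 := fibonacciA p1.2 (n - 2)
    (p1.1 + p2.1, PySem.Dict.insert p2.2 n (p1.1 + p2.1))
termination_by n.toNat
decreasing_by all_goals omega

-- the `while True` loop of A, threading the memo; fuel only totalizes the loop
-- (Fibonacci values are unbounded, so it always breaks long before 100 steps on Dom).
def loopA (x : Int) : Int → PySem.Dict Int Int → Nat → Int
  | n, m, 0 => (fibonacciA m (n - 1)).1
  | n, m, fuel + 1 =>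
    let p := fibonacciA m n
    if p.1 > x then (fibonacciA p.2 (n - 1)).1 else loopA x (n + 1) p.2 fuel

def fibonacci_max (x : Int) : Int := loopA x 0 PySem.Dict.empty 100

-- ===== PORT B =====
def loopB (x : Int) (prev curr : Int) : Nat → Int
  | 0 => prev
  | fuel + 1 => if curr ≤ x then loopB x curr (prev + curr) fuel else prev

def fibonacci_max_alt (x : Int) : Int := loopB x 1 0 100

-- ===== PRECONDITION & SPEC =====
def Spec_fibonacci_max (x : Int) (out : Int) : Prop := out = fibonacci_max_alt x
instance (x : Int) (out : Int) : Decidable (Spec_fibonacci_max x out) := by unfold Spec_fibonacci_max; infer_instance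

-- ===== CLAIM (what is proved, stated in full; the proofs are below) =====
def Claim_equal_fibonacci_max : Prop := ∀ (x : Int), Dom_fibonacci_max x → Spec_fibonacci_max x (fibonacci_max x)

-- ===== LEMMAS AND PROOFS =====

-- proof-side spec: the memoless Fibonacci recursion (the value fibonacci computes)
def fibS (n : Int) : Int :=
  if n = 0 then 0
  else if n < 3 then 1
  else fibS (n - 1) + fibS (n - 2)
termination_by n.toNat
decreasing_by all_goals omega

-- memo invariant: every cached entry holds the true value
def MemoInv (m : PySem.Dict Int Int) : Prop :=
  ∀ k v, PySem.Dict.get? m k = some v → v = fibS k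

theorem fibS_neg1 : fibS (-1) = 1 := by rw [fibS]; norm_num
theorem fibS_zero : fibS 0 = 0 := by rw [fibS]; norm_num
theorem fibS_one : fibS 1 = 1 := by rw [fibS]; norm_num
theorem fibS_two : fibS 2 = 1 := by rw [fibS]; norm_num

theorem fibS_step (n : Int) (h : 0 ≤ n) :
    fibS (n + 1) = fibS n + fibS (n - 1) := by
  by_cases h0 : n = 0
  · subst h0; norm_num [fibS_one, fibS_zero, fibS_neg1]
  · by_cases h1 : n = 1
    · subst h1; norm_num [fibS_two, fibS_one, fibS_zero]
    · rw [fibS]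
      have hne : ¬ (n + 1 = 0) := by omega
      have hlt : ¬ (n + 1 < 3) := by omega
      simp only [hne, hlt, if_false]
      ring_nf

theorem fibS_small (n : Int) (h0 : ¬ n = 0) (h3 : n < 3) : fibS n = 1 := by
  rw [fibS]; simp [h0, h3]

theorem fibS_rec (n : Int) (h0 : ¬ n = 0) (h3 : ¬ n < 3) :
    fibS n = fibS (n - 1) + fibS (n - 2) := by
  rw [fibS]; simp [h0, h3]

theorem fibA_correct : ∀ (fuel : Nat) (n : Int) (m : PySem.Dict Int Int),
    n.toNat ≤ fuel → MemoInv m →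
    (fibonacciA m n).1 = fibS n ∧ MemoInv (fibonacciA m n).2 := by
  intro fuel
  induction fuel with
  | zero =>
    intro n m hfu hm
    rw [fibonacciA]
    by_cases h0 : n = 0
    · simp [h0, fibS_zero, hm]
    · have h3 : n < 3 := by omega
      simp [h0, h3, fibS_small n h0 h3, hm]
  | succ fuel ih =>
    intro n m hfu hm
    rw [fibonacciA]
    by_cases h0 : n = 0
    · simp [h0, fibS_zero, hm]
    · by_cases h3 : n < 3
      · simp [h0, h3, fibS_small n h0 h3, hm]
      · simp only [h0, h3, if_false]
        cases hg : PySem.Dict.get? m n with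
        | some v =>
          exact ⟨by simpa using hm n v hg, by simpa using hm⟩
        | none =>
          simp only
          have h1 := ih (n - 1) m (by omega) hm
          have h2 := ih (n - 2) (fibonacciA m (n - 1)).2 (by omega) h1.2
          refine ⟨by rw [h1.1, h2.1, fibS_rec n h0 h3], ?_⟩
          intro k v hk
          rw [PySem.Dict.get?_insert] at hk
          split_ifs at hk with hkn
          · have hv := (Option.some.injEq _ _).mp hk
            rw [← hv, hkn, h1.1, h2.1, fibS_rec _ h0 h3]
          · exact h2.2 k v hk

theorem loop_eq (x : Int) (fuel : Nat) :
    ∀ (n : Int) (m : PySem.Dict Int Int), 0 ≤ n → MemoInv m →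
      loopA x n m fuel = loopB x (fibS (n - 1)) (fibS n) fuel := by
  induction fuel with
  | zero =>
    intro n m _ hm
    rw [loopA, loopB]
    exact (fibA_correct (n - 1).toNat (n - 1) m le_rfl hm).1
  | succ fuel ih =>
    intro n m hn hm
    have hp := fibA_correct n.toNat n m le_rfl hm
    rw [loopA, loopB]
    simp only [hp.1]
    by_cases h : fibS n > x
    · simp only [h, if_true, not_le.mpr h, if_false]
      exact (fibA_correct (n - 1).toNat (n - 1) _ le_rfl hp.2).1
    · have hle : fibS n ≤ x := not_lt.mp h
      simp only [h, if_false, hle, if_true]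
      rw [ih (n + 1) (fibonacciA m n).2 (by omega) hp.2]
      congr 1
      · simp
      · rw [fibS_step n hn]; ring_nf

theorem Inv_empty : MemoInv PySem.Dict.empty := by
  intro k v hk
  simp [PySem.Dict.get?_empty] at hk

-- ===== VERDICT (by name: the statement is the Claim_ definition above) =====
theorem fibonacci_max_spec : Claim_equal_fibonacci_max := by
  intro x _
  unfold Spec_fibonacci_max fibonacci_max fibonacci_max_alt
  rw [loop_eq x 100 0 PySem.Dict.empty le_rfl Inv_empty]
  simp only [show (0:Int) - 1 = -1 from by norm_num, fibS_neg1, fibS_zero]
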